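-- pv_equiv track=rewrite | github.com/Gerald-Jehova/2048 | 2048_Game.py | not_shifted
-- ===== SOURCE A (Python) =====
-- def not_shifted(line):
--   num = False
--   inner_zero = False
--   for i in line:
--     if(i != 0):
--       num = True
--     if(i == 0 and num == True):
--       inner_zero = True
--
--   return inner_zero
-- ===== SOURCE B (Python) =====
-- def not_shifted(line):
--     # A zero lies after a nonzero iff the first nonzero's index precedes the last zero's index.
--     nonzero_positions = [k for k, v in enumerate(line) if v != 0]
--     zero_positions = [k for k, v in enumerate(line) if v == 0]
--     if not nonzero_positions or not zero_positions:
--         return False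
--     return nonzero_positions[0] < zero_positions[-1]
-- ===== Notes on version B (the rewrite author's own statement) =====
-- stated objective: alternative
-- what changed: Replaces the two-flag stateful scan with an index-based formulation: build the lists of nonzero and zero positions via enumerate and return whether the first nonzero index precedes the last zero index.
import Mathlib
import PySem

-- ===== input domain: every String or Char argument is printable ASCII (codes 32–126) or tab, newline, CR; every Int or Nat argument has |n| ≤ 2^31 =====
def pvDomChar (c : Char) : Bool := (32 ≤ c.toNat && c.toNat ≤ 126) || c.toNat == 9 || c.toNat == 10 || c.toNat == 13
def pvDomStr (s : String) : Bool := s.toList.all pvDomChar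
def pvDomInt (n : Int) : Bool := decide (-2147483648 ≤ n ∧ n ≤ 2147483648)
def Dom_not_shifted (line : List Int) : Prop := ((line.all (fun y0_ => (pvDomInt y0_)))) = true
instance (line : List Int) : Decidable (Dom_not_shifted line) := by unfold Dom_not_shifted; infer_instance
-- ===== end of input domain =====

-- B replaces A's two-flag stateful scan by an index comparison: first-nonzero position < last-zero position.


-- ===== PORT A =====
-- loop body of A: update (num, inner_zero) for one element, in A's order
def pvStepA (st : Bool × Bool) (i : Int) : Bool × Bool :=
  let num := if i ≠ 0 then true else st.1
  let inner_zero := if i = 0 ∧ num = true then true else st.2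
  (num, inner_zero)

def not_shifted (line : List Int) : Bool :=
  (line.foldl pvStepA (false, false)).2

-- ===== PORT B =====
-- Source B's final guard+comparison: False unless both position lists are nonempty, else compare
def pvCmp (fnz? lz? : Option Int) : Bool :=
  match fnz?, lz? with
  | some a, some b => decide (a < b)
  | _, _ => false

def not_shifted_alt (line : List Int) : Bool :=
  let nonzero_positions := ((PySem.List.enumerate line).filter (fun p => p.2 ≠ 0)).map (·.1)
  let zero_positions := ((PySem.List.enumerate line).filter (fun p => p.2 = 0)).map (·.1)
  pvCmp nonzero_positions.head? zero_positions.getLast?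

-- ===== PRECONDITION & SPEC =====
def Spec_not_shifted (line : List Int) (out : Bool) : Prop := out = not_shifted_alt line
instance (line : List Int) (out : Bool) : Decidable (Spec_not_shifted line out) := by unfold Spec_not_shifted; infer_instance

-- ===== CLAIM (what is proved, stated in full; the proofs are below) =====
def Claim_equal_not_shifted : Prop := ∀ (line : List Int), Dom_not_shifted line → Spec_not_shifted line (not_shifted line)

-- ===== LEMMAS AND PROOFS =====

-- A's fold, characterised: inner_zero ends true iff a 0 remains after stripping the leading zeros.
theorem not_shifted_loop (line : List Int) : ∀ (num inner : Bool),
    (line.foldl pvStepA (num, inner)).2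
    = (inner || (if num then line.contains 0
                 else (line.dropWhile (fun x => x == 0)).contains 0)) := by
  induction line with
  | nil => intro num inner; cases num <;> simp
  | cons i t ih =>
    intro num inner
    by_cases hi : i = 0
    · subst hi
      cases num
      · have h : pvStepA (false, inner) 0 = (false, inner) := by simp [pvStepA]
        rw [List.foldl_cons, h, ih]
        simp [List.dropWhile]
      · have h : pvStepA (true, inner) 0 = (true, true) := by simp [pvStepA]
        rw [List.foldl_cons, h, ih]
        simp
    · have h : ∀ num, pvStepA (num, inner) i = (true, inner) := by
        intro num; simp [pvStepA, hi]
      have hb : (i == 0) = false := by simpa using hi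
      rw [List.foldl_cons, h, ih]
      cases num <;>
        simp [List.dropWhile, hb, hi, eq_comm]

-- the zero-position list of (enumerate t s) is empty iff t has no zero
theorem zpos_nil_iff (t : List Int) (s : Int) :
    ((PySem.List.enumerate t s).filter (fun p => p.2 = 0)) = [] ↔ ¬ (0 : Int) ∈ t := by
  rw [List.filter_eq_nil_iff]
  constructor
  · intro h hz
    obtain ⟨k, hk, h0⟩ := List.mem_iff_getElem.mp hz
    have hmem : ((s + (k:Int), t[k]) : Int × Int) ∈ PySem.List.enumerate t s :=
      (PySem.List.mem_enumerate_iff t s _).mpr ⟨k, hk, rfl⟩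
    have h2 := h _ hmem
    rw [h0] at h2
    simp at h2
  · intro h p hp hz
    obtain ⟨k, hk, rfl⟩ := (PySem.List.mem_enumerate_iff t s p).mp hp
    simp at hz
    exact h (hz ▸ List.getElem_mem hk)

-- every first component in (enumerate t s) is ≥ s
theorem enum_fst_ge (t : List Int) (s : Int) (p : Int × Int) (hp : p ∈ PySem.List.enumerate t s) :
    s ≤ p.1 := by
  obtain ⟨k, hk, rfl⟩ := (PySem.List.mem_enumerate_iff t s p).mp hp
  simp

-- B's comparison over enumerate starting at any offset equals the strip-then-search characterisation
theorem alt_enum (t : List Int) : ∀ (s : Int),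
    pvCmp (((PySem.List.enumerate t s).filter (fun p => p.2 ≠ 0)).map (·.1)).head?
          (((PySem.List.enumerate t s).filter (fun p => p.2 = 0)).map (·.1)).getLast?
    = (t.dropWhile (fun x => x == 0)).contains 0 := by
  induction t with
  | nil => intro s; simp [PySem.List.enumerate, pvCmp]
  | cons x t ih =>
    intro s
    rw [PySem.List.enumerate_cons]
    by_cases hx : x = 0
    · subst hx
      have hfilz : ((((s, (0:Int)) :: PySem.List.enumerate t (s+1)).filter (fun p => p.2 = 0)))
          = (s, (0:Int)) :: (PySem.List.enumerate t (s+1)).filter (fun p => p.2 = 0) := by simp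
      have hfilnz : ((((s, (0:Int)) :: PySem.List.enumerate t (s+1)).filter (fun p => p.2 ≠ 0)))
          = (PySem.List.enumerate t (s+1)).filter (fun p => p.2 ≠ 0) := by simp
      have hdw : ((0:Int) :: t).dropWhile (fun y => y == 0) = t.dropWhile (fun y => y == 0) := by
        simp [List.dropWhile]
      rw [hfilz, hfilnz, hdw]
      by_cases hz : ((PySem.List.enumerate t (s+1)).filter (fun p => p.2 = 0)) = []
      · -- t has no zero: both sides false
        rw [hz]
        have h0t : ¬ (0:Int) ∈ t := (zpos_nil_iff t (s+1)).mp hz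
        have hnm : (0:Int) ∉ t.dropWhile (fun y => y == 0) :=
          fun hc => h0t ((List.dropWhile_sublist _).subset hc)
        have hrhs : (t.dropWhile (fun y => y == 0)).contains 0 = false := by simpa using hnm
        rw [hrhs]
        rcases hh : (((PySem.List.enumerate t (s+1)).filter (fun p => p.2 ≠ 0)).map (·.1)).head? with _ | a
        · rw [hh]; simp [pvCmp]
        · have ha : a ∈ (((PySem.List.enumerate t (s+1)).filter (fun p => p.2 ≠ 0)).map (·.1)) :=
            List.mem_of_mem_head? (by rw [hh]; simp)
          obtain ⟨p, hp, rfl⟩ := List.mem_map.mp ha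
          have hge : s + 1 ≤ p.1 := enum_fst_ge t (s+1) p (List.mem_of_mem_filter hp)
          rw [hh]
          simp only [List.map_cons, List.map_nil, List.getLast?_singleton, pvCmp,
            decide_eq_false_iff_not]
          omega
      · -- t has a zero: drop the leading zero and use the IH
        obtain ⟨q, qs, hq⟩ := List.exists_cons_of_ne_nil hz
        rw [hq, List.map_cons, List.map_cons, List.getLast?_cons_cons, ← List.map_cons, ← hq]
        exact ih (s+1)
    · -- x ≠ 0: first nonzero position is s; zeros of x::t are the zeros of t
      have hfilz : ((((s, x) :: PySem.List.enumerate t (s+1)).filter (fun p => p.2 = 0)))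
          = (PySem.List.enumerate t (s+1)).filter (fun p => p.2 = 0) := by simp [hx]
      have hfilnz : ((((s, x) :: PySem.List.enumerate t (s+1)).filter (fun p => p.2 ≠ 0)))
          = (s, x) :: (PySem.List.enumerate t (s+1)).filter (fun p => p.2 ≠ 0) := by simp [hx]
      rw [hfilz, hfilnz]
      have hbx : (x == 0) = false := by simpa using hx
      have hbx' : ((0:Int) == x) = false := by simpa using fun h => hx h.symm
      have hrhs : ((x :: t).dropWhile (fun y => y == 0)).contains 0 = t.contains 0 := by
        simp only [List.dropWhile, hbx]
        rw [List.contains_cons, hbx']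
        simp
      rw [hrhs, List.map_cons, List.head?_cons]
      by_cases hz : ((PySem.List.enumerate t (s+1)).filter (fun p => p.2 = 0)) = []
      · rw [hz]
        have h0t : ¬ (0:Int) ∈ t := (zpos_nil_iff t (s+1)).mp hz
        simp [pvCmp, h0t]
      · rcases hl : (((PySem.List.enumerate t (s+1)).filter (fun p => p.2 = 0)).map (·.1)).getLast? with _ | b
        · rw [List.getLast?_eq_none_iff] at hl
          simp [hz] at hl
        · have hb : b ∈ (((PySem.List.enumerate t (s+1)).filter (fun p => p.2 = 0)).map (·.1)) :=
            List.mem_of_getLast? hl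
          obtain ⟨p, hp, rfl⟩ := List.mem_map.mp hb
          have hge : s + 1 ≤ p.1 := enum_fst_ge t (s+1) p (List.mem_of_mem_filter hp)
          have hz0 := List.of_mem_filter hp
          have h0t : (0:Int) ∈ t := by
            obtain ⟨k, hk, hpk⟩ := (PySem.List.mem_enumerate_iff t (s+1) p).mp (List.mem_of_mem_filter hp)
            rw [hpk] at hz0
            simp at hz0
            rw [← hz0]
            exact List.getElem_mem hk
          have hct : t.contains 0 = true := by simpa using h0t
          rw [hl, hct]
          simp only [pvCmp, decide_eq_true_eq]
          omega

-- ===== VERDICT (by name: the statement is the Claim_ definition above) =====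
theorem not_shifted_spec : Claim_equal_not_shifted := by
  intro line _
  unfold Spec_not_shifted not_shifted not_shifted_alt
  rw [not_shifted_loop, ← alt_enum line 0]
  simp
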